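-- pv_equiv track=rewrite | github.com/i12know/vaysf | middleware/validation/name_matcher.py | _initial_tolerant_match
-- ===== SOURCE A (Python) =====
-- def _initial_tolerant_match(query_tokens: list[str], candidate_tokens: list[str]) -> bool:
--     if not query_tokens or not candidate_tokens:
--         return False
--
--     saw_initial = False
--     saw_non_initial = False
--     for query_token in query_tokens:
--         matched = False
--         for candidate_token in candidate_tokens:
--             if query_token == candidate_token:
--                 matched = True
--                 if len(query_token) >= 2:
--                     saw_non_initial = True
--                 break
--             if len(query_token) == 1 and candidate_token.startswith(query_token):
--                 matched = True
--                 saw_initial = True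
--                 break
--             if len(query_token) >= 2 and candidate_token.startswith(query_token):
--                 matched = True
--                 saw_non_initial = True
--                 break
--         if not matched:
--             return False
--
--     return saw_initial and saw_non_initial
-- ===== SOURCE B (Python) =====
-- def _initial_tolerant_match(query_tokens: list[str], candidate_tokens: list[str]) -> bool:
--     if not query_tokens or not candidate_tokens:
--         return False
--     # Index the candidates once: every prefix of every candidate, and the exact set.
--     prefixes = {c[:i] for c in candidate_tokens for i in range(len(c) + 1)}
--     exact = set(candidate_tokens)
--     saw_initial = False
--     saw_non_initial = False
--     for t in query_tokens:
--         if not t: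
--             # an empty token only matches an empty candidate
--             if t not in exact:
--                 return False
--         elif t not in prefixes:
--             return False
--         elif len(t) >= 2:
--             saw_non_initial = True
--         elif t not in exact:
--             saw_initial = True
--     return saw_initial and saw_non_initial
-- ===== Notes on version B (the rewrite author's own statement) =====
-- stated objective: alternative
-- what changed: Replaces A's nested scan over candidates per query token by a precomputed hash index (the set of all candidate prefixes plus the exact candidate set) so each query token is classified by O(1) lookups; Pre_ excludes inputs where some length-1 query token has both an exact candidate and a proper-extension candidate, on which A's initial flag is an accident of candidate order (first-vs-last match).
-- outside the precondition, e.g. on _initial_tolerant_match(['j', 'jo'], ['jo', 'j']): A returns True, B returns False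
import Mathlib
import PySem

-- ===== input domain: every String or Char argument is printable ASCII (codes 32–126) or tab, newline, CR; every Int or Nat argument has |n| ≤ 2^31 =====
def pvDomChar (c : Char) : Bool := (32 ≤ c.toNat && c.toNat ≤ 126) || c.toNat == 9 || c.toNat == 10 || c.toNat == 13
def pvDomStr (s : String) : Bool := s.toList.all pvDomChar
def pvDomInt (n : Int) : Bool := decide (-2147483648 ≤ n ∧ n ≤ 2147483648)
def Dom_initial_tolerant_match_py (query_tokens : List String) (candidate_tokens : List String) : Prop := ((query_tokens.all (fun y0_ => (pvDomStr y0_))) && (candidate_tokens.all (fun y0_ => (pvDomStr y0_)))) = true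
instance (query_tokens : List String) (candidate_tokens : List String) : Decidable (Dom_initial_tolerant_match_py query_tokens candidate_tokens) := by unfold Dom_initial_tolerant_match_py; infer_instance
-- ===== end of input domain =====

-- B indexes the candidates once (the set of all candidate prefixes plus the exact
-- candidate set) and classifies each query token by lookups, instead of A's
-- nested scan over candidates with three branches (objective: alternative).

-- ===== PORT A =====
-- inner loop of A over candidate_tokens: none = no match (return False);
-- some (i, n) = matched, with the increments to saw_initial / saw_non_initial
def pvInnerA (t : String) : List String → Option (Bool × Bool)
  | [] => none
  | c :: cs =>
    if t == c then some (false, decide (2 ≤ PySem.Str.len t))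
    else if (PySem.Str.len t == 1) && PySem.Str.startswith c t then some (true, false)
    else if (decide (2 ≤ PySem.Str.len t)) && PySem.Str.startswith c t then some (false, true)
    else pvInnerA t cs

-- outer loop of A over query_tokens carrying the two flags
def pvLoopA (cand : List String) : List String → Bool → Bool → Bool
  | [], si, sn => si && sn
  | t :: ts, si, sn =>
    match pvInnerA t cand with
    | none => false
    | some (i, n) => pvLoopA cand ts (si || i) (sn || n)

def initial_tolerant_match_py (query_tokens : List String) (candidate_tokens : List String) : Bool :=
  if query_tokens.isEmpty || candidate_tokens.isEmpty then false
  else pvLoopA candidate_tokens query_tokens false false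

-- ===== PORT B =====
-- {c[:i] for c in candidate_tokens for i in range(len(c) + 1)}
def pvPrefixes (cand : List String) : PySem.Set String :=
  PySem.Set.ofList (cand.flatMap (fun c =>
    (PySem.List.pyRange 0 (PySem.Str.len c + 1) 1).map (fun i => PySem.Str.slice c none (some i))))

-- B's loop over query_tokens carrying the two flags
def pvLoopB (prefixes exact : PySem.Set String) : List String → Bool → Bool → Bool
  | [], si, sn => si && sn
  | t :: ts, si, sn =>
    if PySem.Str.len t == 0 then
      if !(PySem.Set.contains exact t) then false else pvLoopB prefixes exact ts si sn
    else if !(PySem.Set.contains prefixes t) then false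
    else if 2 ≤ PySem.Str.len t then pvLoopB prefixes exact ts si true
    else if !(PySem.Set.contains exact t) then pvLoopB prefixes exact ts true sn
    else pvLoopB prefixes exact ts si sn

def initial_tolerant_match_py_alt (query_tokens : List String) (candidate_tokens : List String) : Bool :=
  if query_tokens.isEmpty || candidate_tokens.isEmpty then false
  else pvLoopB (pvPrefixes candidate_tokens) (PySem.Set.ofList candidate_tokens) query_tokens false false

-- ===== PRECONDITION & SPEC =====
-- Pre_ excludes inputs where some length-1 query token has both an exact candidate
-- and a proper-extension candidate: there A's initial flag depends accidentally on
-- candidate order (first-vs-last match), a corner neither value is specified for.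
def Pre_initial_tolerant_match_py (query_tokens : List String) (candidate_tokens : List String) : Prop :=
  ∀ t ∈ query_tokens, t.length = 1 →
    ¬(t ∈ candidate_tokens ∧ ∃ c ∈ candidate_tokens, c ≠ t ∧ PySem.Str.startswith c t = true)
instance (query_tokens : List String) (candidate_tokens : List String) : Decidable (Pre_initial_tolerant_match_py query_tokens candidate_tokens) := by unfold Pre_initial_tolerant_match_py; infer_instance

def pvWitness_initial_tolerant_match_py : List String × List String := (["a", "bob"], ["alice", "bob"])

def Spec_initial_tolerant_match_py (query_tokens : List String) (candidate_tokens : List String) (out : Bool) : Prop := out = initial_tolerant_match_py_alt query_tokens candidate_tokens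
instance (query_tokens : List String) (candidate_tokens : List String) (out : Bool) : Decidable (Spec_initial_tolerant_match_py query_tokens candidate_tokens out) := by unfold Spec_initial_tolerant_match_py; infer_instance

-- ===== CLAIM (what is proved, stated in full; the proofs are below) =====
def Claim_equal_initial_tolerant_match_py : Prop := ∀ (query_tokens : List String) (candidate_tokens : List String), Dom_initial_tolerant_match_py query_tokens candidate_tokens → Pre_initial_tolerant_match_py query_tokens candidate_tokens → Spec_initial_tolerant_match_py query_tokens candidate_tokens (initial_tolerant_match_py query_tokens candidate_tokens)

-- ===== LEMMAS AND PROOFS =====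

-- A's per-token match condition
def pvMatchA (cand : List String) (t : String) : Bool :=
  cand.any (fun c => c == t || ((decide (t ≠ "")) && PySem.Str.startswith c t))

-- flag increments of A's inner loop, per token
def pvIncI (cand : List String) (t : String) : Bool := ((pvInnerA t cand).getD (false, false)).1
def pvIncN (cand : List String) (t : String) : Bool := ((pvInnerA t cand).getD (false, false)).2

-- first candidate starting with t (for reasoning about A's break order)
def pvFirstStarts (t : String) : List String → Option String
  | [] => none
  | c :: cs => if PySem.Str.startswith c t then some c else pvFirstStarts t cs

theorem pvStartswith_self (l : List Char) : PySem.Chars.startswith l l = true := by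
  simp [PySem.Chars.startswith_iff]

theorem pvLen_pos (t : String) (h : t ≠ "") : 1 ≤ t.length := by
  have h0 : t.length ≠ 0 := fun h0 => h (String.length_eq_zero_iff.mp h0)
  omega

-- one step of A's inner loop
theorem pvInnerA_cons (t c : String) (cs : List String) :
    pvInnerA t (c :: cs) =
      cond (c == t || ((decide (t ≠ "")) && PySem.Str.startswith c t))
        (some (((PySem.Str.len t == 1) && (c != t)), decide (2 ≤ PySem.Str.len t)))
        (pvInnerA t cs) := by
  by_cases h1 : t = c
  · subst h1; simp [pvInnerA, pvStartswith_self]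
  · have e1 : (t == c) = false := by simp [h1]
    have ece : (c == t) = false := by simp [Ne.symm h1]
    have ebne : (c != t) = true := by simp [Ne.symm h1]
    by_cases hemp : t = ""
    · subst hemp
      have ebe : ((PySem.Str.len "" == 1) : Bool) = false := by simp [PySem.Str.len_eq]
      have ed2 : (decide (2 ≤ PySem.Str.len "")) = false := by simp [PySem.Str.len_eq]
      simp only [pvInnerA, e1, ece, ebe, ed2]
      simp
    · have hlen : 1 ≤ t.length := pvLen_pos t hemp
      have edne : (decide (t ≠ "")) = true := by simp [hemp]
      cases hsw : PySem.Str.startswith c t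
      · simp only [pvInnerA, e1, ece, edne, hsw]
        simp
      · by_cases hl1 : t.length = 1
        · have ebe : ((PySem.Str.len t == 1) : Bool) = true := by
            simp [PySem.Str.len_eq, hl1]
          have ed2 : (decide (2 ≤ PySem.Str.len t)) = false := by
            simp [PySem.Str.len_eq]; omega
          simp only [pvInnerA, e1, ece, edne, hsw, ebe, ed2, ebne]
          simp
        · have ebe : ((PySem.Str.len t == 1) : Bool) = false := by
            simp [PySem.Str.len_eq]; omega
          have ed2 : (decide (2 ≤ PySem.Str.len t)) = true := by
            simp [PySem.Str.len_eq]; omega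
          simp only [pvInnerA, e1, ece, edne, hsw, ebe, ed2]
          simp

theorem pvInnerA_isSome (t : String) (cand : List String) :
    (pvInnerA t cand).isSome = pvMatchA cand t := by
  induction cand with
  | nil => simp [pvInnerA, pvMatchA]
  | cons c cs ih =>
    rw [pvInnerA_cons]
    cases hmb : (c == t || ((decide (t ≠ "")) && PySem.Str.startswith c t))
    · simp only [Bool.cond_false, ih, pvMatchA, List.any_cons, hmb, Bool.false_or]
    · simp only [Bool.cond_true, Option.isSome_some, pvMatchA, List.any_cons, hmb,
        Bool.true_or]

theorem pvIncN_eq (t : String) (cand : List String)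
    (h : (pvInnerA t cand).isSome = true) :
    pvIncN cand t = decide (2 ≤ PySem.Str.len t) := by
  induction cand with
  | nil => simp [pvInnerA] at h
  | cons c cs ih =>
    rw [pvInnerA_cons] at h
    unfold pvIncN
    rw [pvInnerA_cons]
    cases hmb : (c == t || ((decide (t ≠ "")) && PySem.Str.startswith c t))
    · rw [hmb] at h
      simp only [Bool.cond_false] at h ⊢
      exact ih h
    · simp only [Bool.cond_true, Option.getD_some]

theorem pvFirstStarts_cons (t c : String) (cs : List String) :
    pvFirstStarts t (c :: cs) =
      cond (PySem.Str.startswith c t) (some c) (pvFirstStarts t cs) := by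
  cases hsw : PySem.Str.startswith c t <;>
    · simp only [PySem.Str.startswith_eq] at hsw
      simp [pvFirstStarts, hsw]

theorem pvFirstStarts_mem (t c : String) (cand : List String)
    (h : pvFirstStarts t cand = some c) :
    c ∈ cand ∧ PySem.Str.startswith c t = true := by
  induction cand with
  | nil => simp [pvFirstStarts] at h
  | cons x xs ih =>
    rw [pvFirstStarts_cons] at h
    cases hsw : PySem.Str.startswith x t
    · rw [hsw] at h
      simp only [Bool.cond_false] at h
      obtain ⟨hm, hs⟩ := ih h
      exact ⟨List.mem_cons_of_mem _ hm, hs⟩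
    · rw [hsw] at h
      simp only [Bool.cond_true, Option.some.injEq] at h
      subst h
      exact ⟨List.mem_cons_self .., hsw⟩

theorem pvFirstStarts_isSome (t : String) (cand : List String) :
    (pvFirstStarts t cand).isSome = cand.any (fun c => PySem.Str.startswith c t) := by
  induction cand with
  | nil => simp [pvFirstStarts]
  | cons x xs ih =>
    rw [pvFirstStarts_cons]
    cases hsw : PySem.Str.startswith x t
    · have hsw' := hsw; rw [PySem.Str.startswith_eq] at hsw'
      simp [hsw', ih]
    · have hsw' := hsw; rw [PySem.Str.startswith_eq] at hsw'
      simp [hsw']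

theorem pvIncI_eq (t : String) (cand : List String) :
    pvIncI cand t =
      ((PySem.Str.len t == 1) &&
        ((pvFirstStarts t cand).elim false (fun c => c != t))) := by
  induction cand with
  | nil => simp [pvIncI, pvInnerA, pvFirstStarts]
  | cons c cs ih =>
    by_cases hl1 : t.length = 1
    · have hne : t ≠ "" := by
        intro h; subst h; simp at hl1
      have ebe : ((PySem.Str.len t == 1) : Bool) = true := by
        simp [PySem.Str.len_eq, hl1]
      have hmb : (c == t || ((decide (t ≠ "")) && PySem.Str.startswith c t))
          = PySem.Str.startswith c t := by
        by_cases hc : c = t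
        · subst hc; simp [pvStartswith_self]
        · have : (c == t) = false := by simp [hc]
          simp [this, hne]
      unfold pvIncI
      rw [pvInnerA_cons, hmb, pvFirstStarts_cons]
      cases hsw : PySem.Str.startswith c t
      · simp only [Bool.cond_false]
        exact ih
      · simp only [Bool.cond_true, Option.getD_some, Option.elim_some, ebe]
    · have ebe : ((PySem.Str.len t == 1) : Bool) = false := by
        simp [PySem.Str.len_eq]; omega
      unfold pvIncI
      rw [pvInnerA_cons, pvFirstStarts_cons]
      cases hmb : (c == t || ((decide (t ≠ "")) && PySem.Str.startswith c t))
      · simp only [Bool.cond_false]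
        rw [show (((pvInnerA t cs).getD (false, false)).1 : Bool) = pvIncI cs t from rfl, ih]
        cases hsw : PySem.Str.startswith c t
        · simp only [Bool.cond_false]
        · simp only [Bool.cond_true, Option.elim_some, ebe, Bool.false_and]
      · simp only [Bool.cond_true, Option.getD_some, ebe, Bool.false_and]

theorem pvAnyCongrMem (l : List String) (p q : String → Bool)
    (h : ∀ x ∈ l, p x = q x) : l.any p = l.any q := by
  induction l with
  | nil => rfl
  | cons x xs ih =>
    simp only [List.any_cons, h x (List.mem_cons_self ..),
      ih (fun y hy => h y (List.mem_cons_of_mem _ hy))]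

theorem pvAllCongrMem (l : List String) (p q : String → Bool)
    (h : ∀ x ∈ l, p x = q x) : l.all p = l.all q := by
  induction l with
  | nil => rfl
  | cons x xs ih =>
    simp only [List.all_cons, h x (List.mem_cons_self ..),
      ih (fun y hy => h y (List.mem_cons_of_mem _ hy))]

theorem pvLoopA_eq (cand : List String) (q : List String) (si sn : Bool) :
    pvLoopA cand q si sn =
      if q.all (pvMatchA cand) then
        (si || q.any (pvIncI cand)) && (sn || q.any (pvIncN cand))
      else false := by
  induction q generalizing si sn with
  | nil => simp [pvLoopA]
  | cons t ts ih =>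
    simp only [pvLoopA, List.all_cons, List.any_cons]
    rcases hin : pvInnerA t cand with _ | ⟨i, n⟩
    · have : pvMatchA cand t = false := by
        rw [← pvInnerA_isSome, hin]; rfl
      simp [this]
    · have hm : pvMatchA cand t = true := by rw [← pvInnerA_isSome, hin]; rfl
      have hi : pvIncI cand t = i := by simp [pvIncI, hin]
      have hn : pvIncN cand t = n := by simp [pvIncN, hin]
      show pvLoopA cand ts (si || i) (sn || n) = _
      rw [ih]
      simp [hm, hi, hn, Bool.or_assoc]

-- B-side characterizations -----------------------------------------------

-- membership in the prefix set is exactly "t is a prefix of some candidate"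
theorem pvPrefixes_contains (cand : List String) (t : String) :
    PySem.Set.contains (pvPrefixes cand) t
      = cand.any (fun c => PySem.Str.startswith c t) := by
  rcases h : cand.any (fun c => PySem.Str.startswith c t) with _ | _
  · rw [Bool.eq_false_iff]
    intro hc
    rw [PySem.Set.contains_iff] at hc
    unfold pvPrefixes at hc
    rw [PySem.Set.mem_ofList, List.mem_flatMap] at hc
    obtain ⟨c, hcm, hm⟩ := hc
    rw [List.mem_map] at hm
    obtain ⟨i, hir, heq⟩ := hm
    rw [PySem.List.mem_pyRange_one] at hir
    have hsw : PySem.Str.startswith c t = true := by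
      rw [PySem.Str.startswith_eq, PySem.Chars.startswith_iff]
      have hsl : (PySem.Str.slice c none (some i)).toList = c.toList.take i.toNat := by
        rw [PySem.Str.toList_slice]; exact PySem.List.slice_to _ hir.1
      rw [← heq, hsl]
      exact List.take_prefix i.toNat c.toList
    rw [List.any_eq_false] at h
    exact absurd hsw (h c hcm)
  · rw [List.any_eq_true] at h
    obtain ⟨c, hcm, hsw⟩ := h
    rw [PySem.Str.startswith_eq, PySem.Chars.startswith_iff] at hsw
    rw [PySem.Set.contains_iff]
    unfold pvPrefixes
    rw [PySem.Set.mem_ofList, List.mem_flatMap]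
    refine ⟨c, hcm, ?_⟩
    rw [List.mem_map]
    refine ⟨(t.toList.length : Int), ?_, ?_⟩
    · rw [PySem.List.mem_pyRange_one, PySem.Str.len_eq]
      have := hsw.length_le
      constructor
      · exact Int.natCast_nonneg _
      · omega
    · have hsl : (PySem.Str.slice c none (some ((t.toList.length : Nat) : Int))).toList
          = c.toList.take t.toList.length := by
        rw [PySem.Str.toList_slice]
        have h2 : PySem.Chars.slice c.toList none (some ((t.toList.length : Nat) : Int))
            = List.take ((t.toList.length : Int)).toNat c.toList :=
          PySem.List.slice_to _ (Int.natCast_nonneg _)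
        rw [h2]
        simp
      apply String.toList_injective
      rw [hsl]
      exact (List.prefix_iff_eq_take.mp hsw).symm

-- B's per-token pass condition and flag contributions
def pvOkB (cand : List String) (t : String) : Bool :=
  if PySem.Str.len t == 0 then PySem.Set.contains (PySem.Set.ofList cand) t
  else PySem.Set.contains (pvPrefixes cand) t

def pvFlagI (cand : List String) (t : String) : Bool :=
  (PySem.Str.len t == 1) && !(PySem.Set.contains (PySem.Set.ofList cand) t)

def pvFlagN (t : String) : Bool := decide (2 ≤ PySem.Str.len t)

theorem pvLoopB_eq (cand : List String) (q : List String) (si sn : Bool) :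
    pvLoopB (pvPrefixes cand) (PySem.Set.ofList cand) q si sn =
      if q.all (pvOkB cand) then
        (si || q.any (pvFlagI cand)) && (sn || q.any pvFlagN)
      else false := by
  induction q generalizing si sn with
  | nil => simp [pvLoopB]
  | cons t ts ih =>
    simp only [List.all_cons, List.any_cons]
    by_cases h0 : PySem.Str.len t = 0
    · have ht : t = "" := by
        have h0' := h0
        simp only [PySem.Str.len_eq, Nat.cast_eq_zero, List.length_eq_zero_iff] at h0'
        exact String.toList_injective (by simp [h0'])
      subst ht
      have eI : pvFlagI cand "" = false := by
        unfold pvFlagI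
        rw [show ((PySem.Str.len "" == 1) : Bool) = false from by decide]
        simp
      have eN : pvFlagN "" = false := by decide
      have hok : pvOkB cand "" = PySem.Set.contains (PySem.Set.ofList cand) "" := by
        unfold pvOkB
        rw [if_pos (show ((PySem.Str.len "" == 0) : Bool) = true from by decide)]
      show (if ((PySem.Str.len "" == 0) : Bool) = true then _ else _) = _
      rw [if_pos (show ((PySem.Str.len "" == 0) : Bool) = true from by decide)]
      cases hex : PySem.Set.contains (PySem.Set.ofList cand) ""
      · rw [if_pos (show ((!false) = true) from rfl)]
        rw [hok, hex]
        simp only [Bool.false_and]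
        rw [if_neg (by simp)]
      · rw [if_neg (show ¬((!true) = true) from by decide)]
        rw [ih, hok, hex, eI, eN]
        simp only [Bool.true_and, Bool.false_or]
    · have e0 : ((PySem.Str.len t == 0) : Bool) = false := by
        rw [beq_eq_false_iff_ne]; exact h0
      have hok : pvOkB cand t = PySem.Set.contains (pvPrefixes cand) t := by
        unfold pvOkB
        rw [if_neg (by rw [e0]; simp)]
      show (if ((PySem.Str.len t == 0) : Bool) = true then _ else _) = _
      rw [if_neg (by rw [e0]; simp)]
      cases hpf : PySem.Set.contains (pvPrefixes cand) t
      · rw [if_pos (show ((!false) = true) from rfl)]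
        rw [hok, hpf]
        simp only [Bool.false_and]
        rw [if_neg (by simp)]
      · rw [if_neg (show ¬((!true) = true) from by decide)]
        rw [hok, hpf]
        simp only [Bool.true_and]
        have hnn : (0:Int) ≤ PySem.Str.len t := by
          rw [PySem.Str.len_eq]; exact Int.natCast_nonneg _
        by_cases h2 : 2 ≤ PySem.Str.len t
        · have eI : pvFlagI cand t = false := by
            unfold pvFlagI
            rw [show ((PySem.Str.len t == 1) : Bool) = false from by
              rw [beq_eq_false_iff_ne]; omega]
            simp
          have eN : pvFlagN t = true := by
            unfold pvFlagN; exact decide_eq_true h2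
          rw [if_pos h2, ih, eI, eN]
          simp only [Bool.false_or, Bool.true_or, Bool.or_true, Bool.and_true]
        · have eb1 : ((PySem.Str.len t == 1) : Bool) = true := by
            rw [beq_iff_eq]
            simp only [PySem.Str.len_eq] at h0 h2 ⊢
            omega
          have eN : pvFlagN t = false := by
            unfold pvFlagN; exact decide_eq_false h2
          rw [if_neg h2]
          cases hex : PySem.Set.contains (PySem.Set.ofList cand) t
          · have eI : pvFlagI cand t = true := by
              unfold pvFlagI; rw [eb1, hex]; rfl
            rw [if_pos (show ((!false) = true) from rfl)]
            rw [ih, eI, eN]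
            simp only [Bool.true_or, Bool.or_true, Bool.true_and, Bool.false_or]
          · have eI : pvFlagI cand t = false := by
              unfold pvFlagI; rw [eb1, hex]; rfl
            rw [if_neg (show ¬((!true) = true) from by decide)]
            rw [ih, eI, eN]
            simp only [Bool.false_or]

-- exact-set membership as list membership
theorem pvExact_contains (cand : List String) (t : String) :
    PySem.Set.contains (PySem.Set.ofList cand) t = decide (t ∈ cand) := by
  rcases h : decide (t ∈ cand) with _ | _
  · rw [Bool.eq_false_iff]
    intro hc
    rw [PySem.Set.contains_iff, PySem.Set.mem_ofList] at hc
    simp at h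
    exact h hc
  · rw [PySem.Set.contains_iff, PySem.Set.mem_ofList]
    simpa using h

-- A's match condition equals B's pass condition
theorem pvEmptyAny (l : List String) : (l.any fun c => (c == "")) = decide ("" ∈ l) := by
  induction l with
  | nil => simp
  | cons c cs ih =>
    simp only [List.any_cons, ih, List.mem_cons]
    by_cases hc : c = ""
    · subst hc; simp
    · have e : (c == "") = false := by simp [hc]
      simp [e, Ne.symm hc]

theorem pvLenNeZero (t : String) (hemp : t ≠ "") : PySem.Str.len t ≠ 0 := by
  intro h
  apply hemp
  simp only [PySem.Str.len_eq, Nat.cast_eq_zero, List.length_eq_zero_iff] at h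
  exact String.toList_injective (by simp [h])

theorem pvMatchA_eq_okB (cand : List String) (t : String) :
    pvMatchA cand t = pvOkB cand t := by
  by_cases hemp : t = ""
  · subst hemp
    unfold pvOkB
    rw [if_pos (show ((PySem.Str.len "" == 0) : Bool) = true from by decide)]
    rw [pvExact_contains]
    unfold pvMatchA
    simp only [ne_eq, not_true_eq_false, decide_false, Bool.false_and, Bool.or_false]
    exact pvEmptyAny cand
  · have h0 : PySem.Str.len t ≠ 0 := pvLenNeZero t hemp
    have e0 : ((PySem.Str.len t == 0) : Bool) = false := by
      rw [beq_eq_false_iff_ne]; exact h0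
    unfold pvOkB
    rw [if_neg (by rw [e0]; simp), pvPrefixes_contains]
    unfold pvMatchA
    apply pvAnyCongrMem
    intro c _
    by_cases hc : c = t
    · subst hc
      simp [pvStartswith_self]
    · have : (c == t) = false := by simp [hc]
      simp [this, hemp]

-- under Pre_, A's saw_initial increment equals B's flag (for matched tokens)
theorem pvIncI_eq_flagI (cand : List String) (t : String)
    (hpre : t.length = 1 →
      ¬(t ∈ cand ∧ ∃ c ∈ cand, c ≠ t ∧ PySem.Str.startswith c t = true))
    (hmatch : pvMatchA cand t = true) :
    pvIncI cand t = pvFlagI cand t := by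
  rw [pvIncI_eq]
  unfold pvFlagI
  by_cases hl1 : t.length = 1
  · have ebe : ((PySem.Str.len t == 1) : Bool) = true := by simp [PySem.Str.len_eq, hl1]
    rw [ebe, Bool.true_and, Bool.true_and, pvExact_contains]
    by_cases hmem : t ∈ cand
    · -- exact candidate exists; Pre_ says no proper extension, so the first
      -- startswith-candidate is t itself
      have hno : ∀ c ∈ cand, PySem.Str.startswith c t = true → c = t := by
        intro c hcm hsw
        by_contra hne
        exact hpre hl1 ⟨hmem, c, hcm, hne, hsw⟩
      rcases hfs : pvFirstStarts t cand with _ | c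
      · simp [hmem]
      · obtain ⟨hcm, hsw⟩ := pvFirstStarts_mem t c cand hfs
        have : c = t := hno c hcm hsw
        subst this
        simp [hmem]
    · -- no exact candidate: matched means some candidate starts with t, and it is ≠ t
      have hne : t ≠ "" := by
        intro h; subst h; simp at hl1
      have hsome : (pvFirstStarts t cand).isSome = true := by
        rw [pvFirstStarts_isSome]
        rw [pvMatchA_eq_okB] at hmatch
        have h0 : PySem.Str.len t ≠ 0 := pvLenNeZero t hne
        have e0 : ((PySem.Str.len t == 0) : Bool) = false := by
          rw [beq_eq_false_iff_ne]; exact h0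
        simp only [pvOkB, e0, Bool.false_eq_true, if_false, pvPrefixes_contains] at hmatch
        exact hmatch
      rcases hfs : pvFirstStarts t cand with _ | c
      · rw [hfs] at hsome; simp at hsome
      · obtain ⟨hcm, _⟩ := pvFirstStarts_mem t c cand hfs
        have : c ≠ t := fun h => hmem (h ▸ hcm)
        simp [hmem, this]
  · have ebe : ((PySem.Str.len t == 1) : Bool) = false := by
      simp [PySem.Str.len_eq]; omega
    rw [ebe]
    simp

-- ===== VERDICT (by name: the statement is the Claim_ definition above) =====
theorem initial_tolerant_match_py_spec : Claim_equal_initial_tolerant_match_py := by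
  intro q c _ hpre
  unfold Spec_initial_tolerant_match_py
  unfold initial_tolerant_match_py initial_tolerant_match_py_alt
  by_cases he : (q.isEmpty || c.isEmpty) = true
  · simp only [he, if_true]
  · simp only [he, Bool.false_eq_true, if_false]
    rw [pvLoopA_eq, pvLoopB_eq]
    have hall : q.all (pvMatchA c) = q.all (pvOkB c) :=
      pvAllCongrMem q _ _ (fun t _ => pvMatchA_eq_okB c t)
    by_cases ha : q.all (pvMatchA c) = true
    · have hb : q.all (pvOkB c) = true := hall ▸ ha
      simp only [ha, hb, if_true, Bool.false_or]
      have hI : q.any (pvIncI c) = q.any (pvFlagI c) :=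
        pvAnyCongrMem q _ _ (fun t hmem =>
          pvIncI_eq_flagI c t (hpre t hmem) (List.all_eq_true.mp ha t hmem))
      have hN : q.any (pvIncN c) = q.any pvFlagN :=
        pvAnyCongrMem q _ _ (fun t hmem => pvIncN_eq t c
          (by rw [pvInnerA_isSome]; exact List.all_eq_true.mp ha t hmem))
      rw [hI, hN]
    · have hb : q.all (pvOkB c) = false := by
        rw [← hall]; exact Bool.eq_false_iff.mpr ha
      simp [ha, hb]
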